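-- pv_equiv track=rewrite | github.com/joseslavkis/Teoria-de-Algoritmos | Greedy/ej14.py | submarinos
-- ===== SOURCE A (Python) =====
-- def obtener_pos_ady(i, j, matriz):
--     total = []
--
--     for i2 in range(max(0, i - 2), min(i + 3, len(matriz))):
--         for j2 in range(max(0, j - 2), min(j + 3, len(matriz[i2]))):
--             total.append((i2, j2))
--
--     return total
--
-- def contar_submarinos(i, j, matriz):
--     pos = obtener_pos_ady(i, j, matriz)
--     count = 0
--
--     for i2, j2 in pos:
--         if matriz[i2][j2]:
--             count += 1
--
--     return count
--
-- def calcular_mejores_pos(matriz):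
--     celdas_iluminadas = []
--
--     for i in range(len(matriz)):
--         for j in range(len(matriz[i])):
--             celdas_iluminadas.append(((i, j), contar_submarinos(i, j, matriz)))
--
--     celdas_iluminadas.sort(key=lambda x: x[1], reverse=True)
--
--     return celdas_iluminadas
--
-- def submarinos(matriz):
--     if len(matriz) == 0:
--         return []
--
--     celdas_iluminadas = calcular_mejores_pos(matriz)
--
--     faros = []
--
--     while True:
--         (x, y), peso = celdas_iluminadas.pop(0)
--
--         if peso == 0:
--             break
--
--         faros.append((x, y))
--
--         posiciones = obtener_pos_ady(x, y, matriz)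
--
--         for i, j in posiciones:
--             matriz[i][j] = False
--
--         celdas_iluminadas = calcular_mejores_pos(matriz)
--
--     return faros
-- ===== SOURCE B (Python) =====
-- def submarinos(matriz):
--     # Greedy: repeatedly place a lighthouse on the cell covering the most
--     # submarines (first such cell in row-major order), then destroy the
--     # covered submarines.  Instead of re-counting every 5x5 window from
--     # scratch and sorting all cells each round, build per-row prefix sums
--     # once per round and pick the best cell in a single fused scan.
--     # Works on a copy; matches A's return value (A mutates its argument).
--     if len(matriz) == 0:
--         return []
--     grid = [row[:] for row in matriz]
--     n = len(grid)
--     faros = []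
--     while True:
--         # per-row prefix sums of submarine counts
--         pref = []
--         for row in grid:
--             p = [0]
--             s = 0
--             for v in row:
--                 s += 1 if v else 0
--                 p.append(s)
--             pref.append(p)
--         # one fused scan: first cell attaining the maximum coverage
--         best = None  # (count, i, j)
--         for i in range(n):
--             for j in range(len(grid[i])):
--                 c = 0
--                 for r in range(max(0, i - 2), min(i + 3, n)):
--                     p = pref[r]
--                     hi = min(j + 3, len(p) - 1)
--                     lo = min(max(0, j - 2), hi)
--                     c += p[hi] - p[lo]
--                 if best is None or c > best[0]:
--                     best = (c, i, j)
--         if best is None or best[0] == 0: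
--             return faros
--         _, x, y = best
--         faros.append((x, y))
--         for r in range(max(0, x - 2), min(x + 3, n)):
--             row = grid[r]
--             for cidx in range(max(0, y - 2), min(y + 3, len(row))):
--                 row[cidx] = False
-- ===== Notes on version B (the rewrite author's own statement) =====
-- stated objective: faster
-- what changed: Each greedy round, A recounts every cell's 5x5 window by brute force and stable-sorts the whole cell list just to pop its first element; B builds per-row prefix sums once per round (O(1) window-column counts) and picks the first maximal cell in a single fused argmax scan, with no sort and no candidate list.
import Mathlib
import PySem

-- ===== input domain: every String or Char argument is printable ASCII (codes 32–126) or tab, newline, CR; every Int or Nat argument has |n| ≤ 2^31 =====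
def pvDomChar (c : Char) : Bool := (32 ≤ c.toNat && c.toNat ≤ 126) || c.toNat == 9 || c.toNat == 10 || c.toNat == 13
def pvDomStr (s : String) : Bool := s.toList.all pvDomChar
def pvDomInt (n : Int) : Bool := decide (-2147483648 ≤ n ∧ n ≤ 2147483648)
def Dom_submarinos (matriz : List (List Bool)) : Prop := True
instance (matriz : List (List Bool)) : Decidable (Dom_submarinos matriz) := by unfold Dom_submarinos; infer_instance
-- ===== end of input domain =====

-- B replaces A's per-round full re-count + full sort with per-row prefix sums and a
-- single fused argmax scan per round (objective: faster). Python A mutates its argument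
-- in place (B works on a copy); the equivalence proved here is about the RETURN value.

-- ===== PORT A =====

-- obtener_pos_ady: the two nested ranges appending (i2, j2) pairs
def pvObtenerPosAdy (i j : Int) (matriz : List (List Bool)) : List (Int × Int) :=
  (PySem.List.pyRange (max 0 (i - 2)) (min (i + 3) (matriz.length : Int)) 1).foldl
    (fun total i2 =>
      (PySem.List.pyRange (max 0 (j - 2))
          (min (j + 3) ((PySem.List.pyGetD matriz i2 []).length : Int)) 1).foldl
        (fun total j2 => total ++ [(i2, j2)]) total)
    []

-- contar_submarinos: count the true cells among those positions
def pvContarSubmarinos (i j : Int) (matriz : List (List Bool)) : Int :=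
  (pvObtenerPosAdy i j matriz).foldl
    (fun count p =>
      if PySem.List.pyGetD (PySem.List.pyGetD matriz p.1 []) p.2 false then count + 1
      else count)
    0

-- calcular_mejores_pos: list every cell with its count, stable-sort by count descending
def pvCalcularMejoresPos (matriz : List (List Bool)) : List ((Int × Int) × Int) :=
  PySem.List.sorted
    ((PySem.List.pyRange 0 (matriz.length : Int) 1).foldl
      (fun cel i =>
        (PySem.List.pyRange 0 ((PySem.List.pyGetD matriz i []).length : Int) 1).foldl
          (fun cel j => cel ++ [((i, j), pvContarSubmarinos i j matriz)]) cel)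
      [])
    (fun x => x.2) true

-- fuel for the while-True loop: every placed lighthouse has peso > 0 and clears at least
-- one true cell, so the loop performs at most (number of true cells) + 1 iterations
def pvFuel (matriz : List (List Bool)) : Nat :=
  (matriz.map (fun r => r.countP (fun b => b))).sum + 1

-- the while-True loop of A: pop the best cell, stop on peso == 0, clear its zone, recompute
def pvSubmarinosLoop : Nat → List (List Bool) → List (Int × Int) → List (Int × Int)
  | 0, _, faros => faros
  | fuel + 1, matriz, faros =>
    match pvCalcularMejoresPos matriz with
    | [] => faros  -- Python's pop(0) raises IndexError here; excluded by Pre_submarinos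
    | ((x, y), peso) :: _ =>
      if peso = 0 then faros
      else
        pvSubmarinosLoop fuel
          ((pvObtenerPosAdy x y matriz).foldl
            (fun m p =>
              PySem.List.pySetD m p.1 (PySem.List.pySetD (PySem.List.pyGetD m p.1 []) p.2 false))
            matriz)
          (faros ++ [(x, y)])

def submarinos (matriz : List (List Bool)) : List (Int × Int) :=
  if matriz.length = 0 then [] else pvSubmarinosLoop (pvFuel matriz) matriz []

-- ===== PORT B =====

-- p = [0]; s = 0; for v in row: s += 1 if v else 0; p.append(s)
def pvPrefRow (row : List Bool) : List Int :=
  (row.foldl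
    (fun (ps : List Int × Int) v =>
      let s := ps.2 + (if v then 1 else 0)
      (ps.1 ++ [s], s))
    ([0], 0)).1

-- pref = []; for row in grid: pref.append(prefRow row)
def pvBuildPrefs (grid : List (List Bool)) : List (List Int) :=
  grid.foldl (fun pref row => pref ++ [pvPrefRow row]) []

-- coverage of cell (i, j) from the prefix sums: sum over the window rows of p[hi] - p[lo]
def pvCellCount (pref : List (List Int)) (n : Int) (i j : Int) : Int :=
  (PySem.List.pyRange (max 0 (i - 2)) (min (i + 3) n) 1).foldl
    (fun c r =>
      let p := PySem.List.pyGetD pref r []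
      let hi := min (j + 3) ((p.length : Int) - 1)
      let lo := min (max 0 (j - 2)) hi
      c + (PySem.List.pyGetD p hi 0 - PySem.List.pyGetD p lo 0))
    0

-- one fused scan: best = None; update best whenever c > best[0]
def pvBestScan (grid : List (List Bool)) : Option (Int × Int × Int) :=
  let pref := pvBuildPrefs grid
  let n := (grid.length : Int)
  (PySem.List.pyRange 0 n 1).foldl
    (fun best i =>
      (PySem.List.pyRange 0 ((PySem.List.pyGetD grid i []).length : Int) 1).foldl
        (fun best j =>
          let c := pvCellCount pref n i j
          match best with
          | none => some (c, i, j)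
          | some b => if b.1 < c then some (c, i, j) else some b)
        best)
    none

-- the clearing loops of B: set the whole 5x5 window (clipped per row) to False
def pvClearZone (x y : Int) (grid : List (List Bool)) : List (List Bool) :=
  (PySem.List.pyRange (max 0 (x - 2)) (min (x + 3) (grid.length : Int)) 1).foldl
    (fun g r =>
      let row := PySem.List.pyGetD g r []
      PySem.List.pySetD g r
        ((PySem.List.pyRange (max 0 (y - 2)) (min (y + 3) (row.length : Int)) 1).foldl
          (fun row c => PySem.List.pySetD row c false) row))
    grid

-- the while-True loop of B
def pvSubmarinosAltLoop : Nat → List (List Bool) → List (Int × Int) → List (Int × Int)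
  | 0, _, faros => faros
  | fuel + 1, grid, faros =>
    match pvBestScan grid with
    | none => faros
    | some (c, x, y) =>
      if c = 0 then faros
      else pvSubmarinosAltLoop fuel (pvClearZone x y grid) (faros ++ [(x, y)])

def submarinos_alt (matriz : List (List Bool)) : List (Int × Int) :=
  if matriz.length = 0 then [] else pvSubmarinosAltLoop (pvFuel matriz) matriz []

-- ===== PRECONDITION & SPEC =====
-- Pre_ excludes non-empty matrices all of whose rows are empty: there A's pop(0) on the
-- empty candidate list raises IndexError (no value is returned).
def Pre_submarinos (matriz : List (List Bool)) : Prop :=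
  matriz = [] ∨ ∃ row ∈ matriz, row ≠ []
instance (matriz : List (List Bool)) : Decidable (Pre_submarinos matriz) := by
  unfold Pre_submarinos; infer_instance

def pvWitness_submarinos : List (List Bool) := [[true, false], [false, true]]

def Spec_submarinos (matriz : List (List Bool)) (out : List (Int × Int)) : Prop :=
  out = submarinos_alt matriz
instance (matriz : List (List Bool)) (out : List (Int × Int)) : Decidable (Spec_submarinos matriz out) := by
  unfold Spec_submarinos; infer_instance

-- ===== CLAIM (what is proved, stated in full; the proofs are below) =====
def Claim_equal_submarinos : Prop :=
  ∀ (matriz : List (List Bool)), Dom_submarinos matriz → Pre_submarinos matriz →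
    Spec_submarinos matriz (submarinos matriz)

-- ===== LEMMAS AND PROOFS =====

-- the unsorted candidate list A builds, in flatMap form
def pvCells (matriz : List (List Bool)) : List ((Int × Int) × Int) :=
  (PySem.List.pyRange 0 (matriz.length : Int) 1).flatMap
    (fun i =>
      (PySem.List.pyRange 0 ((PySem.List.pyGetD matriz i []).length : Int) 1).map
        (fun j => ((i, j), pvContarSubmarinos i j matriz)))

-- Python's stable max-first selection: the fold bestScan performs, on A's pair shape
def pvPick (b : Option ((Int × Int) × Int)) (x : (Int × Int) × Int) : Option ((Int × Int) × Int) :=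
  match b with
  | none => some x
  | some b => if b.2 < x.2 then some x else some b

theorem pvCalcular_eq_sorted_cells (m : List (List Bool)) :
    pvCalcularMejoresPos m = PySem.List.sorted (pvCells m) (fun x => x.2) true := by
  unfold pvCalcularMejoresPos pvCells
  congr 1
  simp only [PySem.List.foldl_append_singleton_eq_map]
  rw [show (fun (cel : List ((Int × Int) × Int)) (i : Int) =>
        cel ++ (PySem.List.pyRange 0 ((PySem.List.pyGetD m i []).length : Int) 1).map
          (fun j => ((i, j), pvContarSubmarinos i j m))) =
      (fun cel i => cel ++ ((fun i => (PySem.List.pyRange 0 ((PySem.List.pyGetD m i []).length : Int) 1).map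
          (fun j => ((i, j), pvContarSubmarinos i j m))) i)) from rfl]
  rw [PySem.List.foldl_append_eq_flatMap]
  simp

-- insertBy unfolding
theorem pvInsertBy_nil {α : Type} (before : α → α → Bool) (x : α) :
    PySem.List.insertBy before x [] = [x] := rfl

theorem pvInsertBy_cons {α : Type} (before : α → α → Bool) (x y : α) (ys : List α) :
    PySem.List.insertBy before x (y :: ys) =
      if before x y then x :: y :: ys else y :: PySem.List.insertBy before x ys := rfl

-- stability: the head of Python's reverse sort is the FIRST element of maximal key,
-- i.e. exactly what the running-max fold keeps
theorem pvHead_sorted_rev {α : Type} (key : α → Int) (l : List α) :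
    (PySem.List.sorted l key true).head? =
      l.foldl (fun b x =>
        match b with
        | none => some x
        | some b => if key b < key x then some x else some b) none := by
  induction l using List.reverseRecOn with
  | nil => rfl
  | append_singleton l x ih =>
    rw [PySem.List.sorted_rev_eq_foldl_insertBy] at ih ⊢
    rw [List.foldl_append, List.foldl_append]
    simp only [List.foldl_cons, List.foldl_nil]
    rcases h : List.foldl (fun acc x => PySem.List.insertBy (fun a b => decide (key b < key a)) x acc) [] l with _ | ⟨b, t⟩
    · rw [h] at ih
      simp only [List.head?_nil] at ih
      rw [← ih, pvInsertBy_nil]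
      rfl
    · rw [h] at ih
      simp only [List.head?_cons] at ih
      rw [← ih, pvInsertBy_cons]
      by_cases hb : key b < key x
      · simp [hb]
      · simp [hb]

theorem pvHead_calcular (m : List (List Bool)) :
    (pvCalcularMejoresPos m).head? = (pvCells m).foldl pvPick none := by
  rw [pvCalcular_eq_sorted_cells, pvHead_sorted_rev (fun x => x.2) (pvCells m)]
  apply PySem.List.foldl_congr_mem
  intro acc x _
  cases acc <;> rfl

-- ---- counting: prefix sums agree with the direct window count ----

-- characterisation of pvPrefRow's fold state
theorem pvPrefRow_foldl (row : List Bool) :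
    row.foldl
      (fun (ps : List Int × Int) v =>
        let s := ps.2 + (if v then 1 else 0)
        (ps.1 ++ [s], s))
      ([0], 0) =
    ((List.range (row.length + 1)).map (fun k => ((row.take k).countP id : Int)),
      (row.countP id : Int)) := by
  induction row using List.reverseRecOn with
  | nil => rfl
  | append_singleton l v ih =>
    rw [List.foldl_append, ih]
    simp only [List.foldl_cons, List.foldl_nil]
    have hcnt : ((l ++ [v]).countP id : Int) = (l.countP id : Int) + (if v then 1 else 0) := by
      rw [List.countP_append]
      push_cast
      cases v <;> simp [id]
    rw [Prod.mk.injEq]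
    refine ⟨?_, by rw [hcnt]⟩
    conv_rhs => rw [show (l ++ [v]).length + 1 = (l.length + 1) + 1 by simp,
      List.range_succ, List.map_append]
    congr 1
    · apply List.map_congr_left
      intro k hk
      rw [List.mem_range] at hk
      rw [List.take_append_of_le_length (by omega)]
    · simp only [List.map_cons, List.map_nil]
      congr 1
      rw [List.take_of_length_le (by simp), hcnt]

theorem pvPrefRow_eq_map (row : List Bool) :
    pvPrefRow row = (List.range (row.length + 1)).map (fun k => ((row.take k).countP id : Int)) := by
  unfold pvPrefRow
  rw [pvPrefRow_foldl]

theorem pvPrefRow_length (row : List Bool) : (pvPrefRow row).length = row.length + 1 := by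
  rw [pvPrefRow_eq_map]; simp

theorem pvPrefRow_get (row : List Bool) (k : Nat) (hk : k ≤ row.length) :
    PySem.List.pyGetD (pvPrefRow row) (k : Int) 0 = ((row.take k).countP id : Int) := by
  rw [pvPrefRow_eq_map, PySem.List.pyGetD_of_nonneg _ _ (by positivity)]
  simp only [Int.toNat_natCast]
  rw [List.getD_eq_getElem?_getD]
  rw [List.getElem?_eq_getElem (by simpa using Nat.lt_succ_of_le hk)]
  simp

-- counting trues over a contiguous index range telescopes into prefix-count differences
theorem pvCount_range (row : List Bool) (a : Nat) (d : Nat) (hd : a + d ≤ row.length) :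
    (((PySem.List.pyRange (a : Int) ((a : Int) + (d : Int)) 1).countP
        (fun j2 => PySem.List.pyGetD row j2 false) : Nat) : Int) =
      ((row.take (a + d)).countP id : Int) - ((row.take a).countP id : Int) := by
  induction d with
  | zero => simp [PySem.List.pyRange_one_eq_nil]
  | succ d ih =>
    have hled : a + d ≤ row.length := by omega
    have hlt : a + d < row.length := by omega
    have hget : PySem.List.pyGetD row ((a : Int) + (d : Int)) false = row[a + d] := by
      rw [show (a : Int) + (d : Int) = ((a + d : Nat) : Int) by push_cast; ring]
      rw [PySem.List.pyGetD_of_nonneg _ _ (by positivity)]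
      simp only [Int.toNat_natCast]
      rw [List.getD_eq_getElem?_getD, List.getElem?_eq_getElem hlt]
      simp
    have hstep : ((row.take (a + (d + 1))).countP id : Int)
        = ((row.take (a + d)).countP id : Int) + (if row[a + d] then 1 else 0) := by
      rw [show a + (d + 1) = (a + d) + 1 by omega, List.take_add_one,
        List.getElem?_eq_getElem hlt]
      rw [List.countP_append]
      push_cast
      cases hv : row[a + d] <;> simp [id]
    rw [show ((d + 1 : Nat) : Int) = (d : Int) + 1 by omega,
      show (a : Int) + ((d : Int) + 1) = ((a : Int) + (d : Int)) + 1 by ring,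
      PySem.List.pyRange_one_succ_right (by push_cast; omega)]
    rw [List.countP_append]
    push_cast
    rw [ih hled, hstep]
    simp only [List.countP_cons, List.countP_nil, hget]
    cases hv : row[a + d] <;> simp
    all_goals ring

-- per-row window count: prefix difference = direct count (j ≥ 0)
theorem pvRow_window (row : List Bool) (j : Int) (hj : 0 ≤ j) :
    PySem.List.pyGetD (pvPrefRow row) (min (j + 3) (((pvPrefRow row).length : Int) - 1)) 0 -
      PySem.List.pyGetD (pvPrefRow row)
        (min (max 0 (j - 2)) (min (j + 3) (((pvPrefRow row).length : Int) - 1))) 0 =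
    (((PySem.List.pyRange (max 0 (j - 2)) (min (j + 3) (row.length : Int)) 1).countP
        (fun j2 => PySem.List.pyGetD row j2 false) : Nat) : Int) := by
  have hlen : ((pvPrefRow row).length : Int) - 1 = (row.length : Int) := by
    rw [pvPrefRow_length]; push_cast; ring
  rw [hlen]
  have ha0 : (0 : Int) ≤ max 0 (j - 2) := le_max_left 0 (j - 2)
  have hb0 : (0 : Int) ≤ min (j + 3) (row.length : Int) := by
    apply le_min <;> omega
  generalize ha : max 0 (j - 2) = a at *
  generalize hb : min (j + 3) (row.length : Int) = b at *
  have hblen : b ≤ (row.length : Int) := by rw [← hb]; exact min_le_right _ _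
  by_cases hab : a ≤ b
  · rw [min_eq_left hab]
    obtain ⟨an, rfl⟩ : ∃ an : Nat, a = (an : Int) := ⟨a.toNat, (Int.toNat_of_nonneg ha0).symm⟩
    obtain ⟨dn, hdn⟩ : ∃ dn : Nat, b = (an : Int) + (dn : Int) := ⟨(b - an).toNat, by omega⟩
    have hsum : an + dn ≤ row.length := by omega
    rw [hdn, pvCount_range row an dn hsum]
    rw [show (an : Int) + (dn : Int) = ((an + dn : Nat) : Int) by push_cast; ring]
    rw [pvPrefRow_get row (an + dn) hsum, pvPrefRow_get row an (by omega)]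
  · rw [min_eq_right (by omega : b ≤ a), PySem.List.pyRange_one_eq_nil (by omega)]
    simp

-- pvBuildPrefs is the row-wise map of pvPrefRow
theorem pvBuildPrefs_eq_map (grid : List (List Bool)) :
    pvBuildPrefs grid = grid.map pvPrefRow := by
  unfold pvBuildPrefs
  rw [PySem.List.foldl_append_singleton_eq_map]
  simp

-- obtener_pos_ady in flatMap form
theorem pvObtener_flatMap (i j : Int) (m : List (List Bool)) :
    pvObtenerPosAdy i j m =
      (PySem.List.pyRange (max 0 (i - 2)) (min (i + 3) (m.length : Int)) 1).flatMap
        (fun i2 =>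
          (PySem.List.pyRange (max 0 (j - 2))
              (min (j + 3) ((PySem.List.pyGetD m i2 []).length : Int)) 1).map
            (fun j2 => (i2, j2))) := by
  unfold pvObtenerPosAdy
  simp only [PySem.List.foldl_append_singleton_eq_map]
  rw [show (fun (total : List (Int × Int)) (i2 : Int) =>
        total ++ (PySem.List.pyRange (max 0 (j - 2))
            (min (j + 3) ((PySem.List.pyGetD m i2 []).length : Int)) 1).map (fun j2 => (i2, j2))) =
      (fun total i2 => total ++ ((fun i2 => (PySem.List.pyRange (max 0 (j - 2))
            (min (j + 3) ((PySem.List.pyGetD m i2 []).length : Int)) 1).map (fun j2 => (i2, j2))) i2))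
      from rfl]
  rw [PySem.List.foldl_append_eq_flatMap]
  simp

-- the prefix-sum count equals A's direct count for any cell with j ≥ 0
theorem pvCellCount_eq_contar (m : List (List Bool)) (i j : Int) (hj : 0 ≤ j) :
    pvCellCount (pvBuildPrefs m) (m.length : Int) i j = pvContarSubmarinos i j m := by
  unfold pvCellCount pvContarSubmarinos
  rw [pvObtener_flatMap, List.foldl_flatMap]
  apply PySem.List.foldl_congr_mem
  intro acc r hr
  rw [PySem.List.mem_pyRange_one] at hr
  have hr0 : 0 ≤ r := le_trans (le_max_left 0 (i - 2)) hr.1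
  have hrlen : r < (m.length : Int) := lt_of_lt_of_le hr.2 (min_le_right _ _)
  have hpref : PySem.List.pyGetD (pvBuildPrefs m) r [] = pvPrefRow (PySem.List.pyGetD m r []) := by
    rw [pvBuildPrefs_eq_map]
    rw [PySem.List.pyGetD_eq_getElem _ _ hr0 (by simpa using hrlen),
        PySem.List.pyGetD_eq_getElem _ _ hr0 hrlen]
    simp
  dsimp only
  rw [hpref, List.foldl_map]
  rw [PySem.List.foldl_if_add_one (p := fun j2 =>
    PySem.List.pyGetD (PySem.List.pyGetD m r []) j2 false)]
  rw [pvRow_window (PySem.List.pyGetD m r []) j hj]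

-- ---- the fused scan is the pick-fold over A's candidate list ----

theorem pvFoldl_pick_map (l : List ((Int × Int) × Int)) (b : Option ((Int × Int) × Int)) :
    l.foldl
      (fun best x =>
        match best with
        | none => some (x.2, x.1.1, x.1.2)
        | some bb => if bb.1 < x.2 then some (x.2, x.1.1, x.1.2) else some bb)
      (Option.map (fun p => (p.2, p.1.1, p.1.2)) b) =
    Option.map (fun p => (p.2, p.1.1, p.1.2)) (l.foldl pvPick b) := by
  induction l generalizing b with
  | nil => rfl
  | cons x xs ih =>
    simp only [List.foldl_cons]
    rcases b with _ | ⟨⟨⟨bi, bj⟩, bc⟩⟩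
    · exact ih (some x)
    · simp only [Option.map_some, pvPick]
      by_cases h : bc < x.2
      · simp only [h, if_true]
        exact ih (some x)
      · simp only [h, if_false]
        exact ih (some ((bi, bj), bc))

theorem pvBestScan_eq (m : List (List Bool)) :
    pvBestScan m = Option.map (fun p => (p.2, p.1.1, p.1.2)) ((pvCells m).foldl pvPick none) := by
  rw [← pvFoldl_pick_map (pvCells m) none]
  simp only [Option.map_none]
  unfold pvBestScan pvCells
  rw [List.foldl_flatMap]
  dsimp only
  apply PySem.List.foldl_congr_mem
  intro acc i hi
  rw [List.foldl_map]
  apply PySem.List.foldl_congr_mem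
  intro acc2 j hj
  rw [PySem.List.mem_pyRange_one] at hj
  dsimp only
  rw [pvCellCount_eq_contar m i j hj.1]

-- ---- clearing the window: A's flattened per-cell writes = B's per-row writes ----

theorem pvSet_row_fold (cs : List Int) (r : Int) (hr0 : 0 ≤ r) :
    ∀ g : List (List Bool), r < (g.length : Int) →
    cs.foldl
      (fun g c =>
        PySem.List.pySetD g r (PySem.List.pySetD (PySem.List.pyGetD g r []) c false)) g =
    PySem.List.pySetD g r
      (cs.foldl (fun row c => PySem.List.pySetD row c false) (PySem.List.pyGetD g r [])) := by
  induction cs with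
  | nil =>
    intro g hg
    simp only [List.foldl_nil]
    rw [PySem.List.pySetD_of_nonneg _ _ hr0,
        PySem.List.pyGetD_eq_getElem _ _ hr0 hg]
    rw [List.set_getElem_self]
  | cons c cs ih =>
    intro g hg
    simp only [List.foldl_cons]
    have hlen : ((PySem.List.pySetD g r
        (PySem.List.pySetD (PySem.List.pyGetD g r []) c false)).length : Int) = (g.length : Int) := by
      rw [PySem.List.length_pySetD]
    rw [ih _ (by omega)]
    have hget : PySem.List.pyGetD
        (PySem.List.pySetD g r (PySem.List.pySetD (PySem.List.pyGetD g r []) c false)) r []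
        = PySem.List.pySetD (PySem.List.pyGetD g r []) c false := by
      rw [PySem.List.pySetD_of_nonneg _ _ hr0,
          PySem.List.pyGetD_of_nonneg _ _ hr0]
      rw [List.getD_eq_getElem?_getD]
      rw [List.getElem?_set_self' ]
      rw [List.getElem?_eq_getElem (by omega)]
      simp
    rw [hget]
    rw [PySem.List.pySetD_of_nonneg _ _ hr0, PySem.List.pySetD_of_nonneg _ _ hr0,
        PySem.List.pySetD_of_nonneg _ _ hr0]
    rw [List.set_set]

theorem pvClear_eq (x y : Int) (m : List (List Bool)) :
    (pvObtenerPosAdy x y m).foldl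
      (fun g p =>
        PySem.List.pySetD g p.1 (PySem.List.pySetD (PySem.List.pyGetD g p.1 []) p.2 false))
      m =
    pvClearZone x y m := by
  unfold pvClearZone
  rw [pvObtener_flatMap, List.foldl_flatMap]
  -- generalized induction over the row list, keeping the length profile invariant
  have main : ∀ (rs : List Int) (g : List (List Bool)),
      (∀ k : Nat, (g.getD k []).length = (m.getD k []).length) → g.length = m.length →
      (∀ r ∈ rs, 0 ≤ r ∧ r < (m.length : Int)) →
      rs.foldl
        (fun g r =>
          ((PySem.List.pyRange (max 0 (y - 2))
              (min (y + 3) ((PySem.List.pyGetD m r []).length : Int)) 1).map (fun j2 => (r, j2))).foldl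
            (fun g p =>
              PySem.List.pySetD g p.1 (PySem.List.pySetD (PySem.List.pyGetD g p.1 []) p.2 false)) g) g =
      rs.foldl
        (fun g r =>
          let row := PySem.List.pyGetD g r []
          PySem.List.pySetD g r
            ((PySem.List.pyRange (max 0 (y - 2)) (min (y + 3) (row.length : Int)) 1).foldl
              (fun row c => PySem.List.pySetD row c false) row)) g := by
    intro rs
    induction rs with
    | nil => intro g _ _ _; rfl
    | cons r rs ih =>
      intro g hlenp hlen hmem
      obtain ⟨hr0, hrlt⟩ := hmem r (List.mem_cons_self)
      have hrg : r < (g.length : Int) := by rw [hlen]; exact hrlt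
      have hrow_len : ((PySem.List.pyGetD g r []).length : Int)
          = ((PySem.List.pyGetD m r []).length : Int) := by
        rw [PySem.List.pyGetD_of_nonneg _ _ hr0, PySem.List.pyGetD_of_nonneg _ _ hr0]
        exact_mod_cast hlenp r.toNat
      simp only [List.foldl_cons]
      rw [List.foldl_map]
      rw [pvSet_row_fold _ r hr0 g hrg]
      rw [← hrow_len]
      apply ih
      · intro k
        rw [PySem.List.pySetD_of_nonneg _ _ hr0]
        by_cases hk : k = r.toNat
        · subst hk
          rw [List.getD_eq_getElem?_getD, List.getElem?_set_self',
              List.getElem?_eq_getElem (by omega)]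
          simp only [Option.map_eq_map, Option.map_some, Option.getD_some, Function.const_apply]
          have : ∀ (row : List Bool) (cs : List Int),
              (cs.foldl (fun row c => PySem.List.pySetD row c false) row).length = row.length := by
            intro row cs
            induction cs generalizing row with
            | nil => rfl
            | cons c cs ih2 => simp only [List.foldl_cons]; rw [ih2, PySem.List.length_pySetD]
          rw [this]
          rw [PySem.List.pyGetD_of_nonneg _ _ hr0, List.getD_eq_getElem?_getD,
              List.getElem?_eq_getElem (by omega)]
          simp only [Option.map_some, Option.getD_some]
          rw [← hlenp r.toNat]
          rw [List.getD_eq_getElem?_getD, List.getElem?_eq_getElem (by omega)]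
          simp
        · rw [List.getD_eq_getElem?_getD, List.getElem?_set_ne (by omega),
              ← List.getD_eq_getElem?_getD]
          exact hlenp k
      · rw [PySem.List.length_pySetD]; exact hlen
      · intro r' hr'; exact hmem r' (List.mem_cons_of_mem _ hr')
  apply main
  · intro k; rfl
  · rfl
  · intro r hr
    rw [PySem.List.mem_pyRange_one] at hr
    exact ⟨le_trans (le_max_left _ _) hr.1, lt_of_lt_of_le hr.2 (min_le_right _ _)⟩

-- ---- the loops agree step for step ----

theorem pvLoop_eq (fuel : Nat) :
    ∀ (m : List (List Bool)) (faros : List (Int × Int)),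
      pvSubmarinosLoop fuel m faros = pvSubmarinosAltLoop fuel m faros := by
  induction fuel with
  | zero => intro m faros; rfl
  | succ fuel ih =>
    intro m faros
    have hhead := pvHead_calcular m
    have hbest := pvBestScan_eq m
    rw [pvSubmarinosLoop, pvSubmarinosAltLoop]
    rcases hc : pvCalcularMejoresPos m with _ | ⟨⟨⟨x, y⟩, peso⟩, rest⟩
    · rw [hc] at hhead
      simp only [List.head?_nil] at hhead
      rw [← hhead] at hbest
      simp only [Option.map_none] at hbest
      rw [hbest]
    · rw [hc] at hhead
      simp only [List.head?_cons] at hhead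
      rw [← hhead] at hbest
      simp only [Option.map_some] at hbest
      rw [hbest]
      simp only
      by_cases hp : peso = 0
      · simp [hp]
      · simp only [hp, if_false]
        rw [pvClear_eq, ih]

-- ===== VERDICT (by name: the statement is the Claim_ definition above) =====
theorem submarinos_spec : Claim_equal_submarinos := by
  intro matriz _ _
  unfold Spec_submarinos submarinos submarinos_alt
  by_cases h : matriz.length = 0
  · simp [h]
  · simp only [h, if_false]
    exact pvLoop_eq (pvFuel matriz) matriz []
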